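-- pv_equiv track=rewrite | github.com/LoganFriedrich/MouseReach | training/analyze_error_patterns.py | match_reaches
-- ===== SOURCE A (Python) =====
-- def match_reaches(gt_reaches, algo_reaches, max_dist=30):
--     """Match GT reaches to algo reaches by start frame proximity (1:1 greedy)."""
--     candidates = []
--     for gi, gr in enumerate(gt_reaches):
--         for ai, ar in enumerate(algo_reaches):
--             dist = abs(gr['start_frame'] - ar.get('start_frame', 0))
--             if dist <= max_dist:
--                 candidates.append((dist, gi, ai))
--     candidates.sort()
--     gt_used, algo_used = set(), set()
--     matches = []
--     for dist, gi, ai in candidates: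
--         if gi not in gt_used and ai not in algo_used:
--             gt_used.add(gi)
--             algo_used.add(ai)
--             matches.append((gi, ai, dist))
--     return matches, set(range(len(gt_reaches))) - gt_used
-- ===== SOURCE B (Python) =====
-- def match_reaches(gt_reaches, algo_reaches, max_dist=30):
--     """Repeated-minimum greedy: no global candidate list and no sort; each
--     round rebuilds the still-free candidate edges and picks the minimum one."""
--     gt_used, algo_used = set(), set()
--     matches = []
--     while True:
--         free = [(d, gi, ai)
--                 for gi, gr in enumerate(gt_reaches) if gi not in gt_used
--                 for ai, ar in enumerate(algo_reaches) if ai not in algo_used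
--                 if (d := abs(gr['start_frame'] - ar.get('start_frame', 0))) <= max_dist]
--         if not free:
--             break
--         dist, gi, ai = min(free)
--         matches.append((gi, ai, dist))
--         gt_used.add(gi)
--         algo_used.add(ai)
--     return matches, {gi for gi in range(len(gt_reaches)) if gi not in gt_used}
-- ===== Notes on version B (the rewrite author's own statement) =====
-- stated objective: alternative
-- what changed: B replaces A's build-all-candidates + global sort + single greedy sweep by a sort-free repeated-minimum loop: each round it recomputes the still-free in-range (gi,ai) edges and picks the lexicographically minimal (dist,gi,ai), proving repeated-min extraction yields the same matching as sorted greedy.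
import Mathlib
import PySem

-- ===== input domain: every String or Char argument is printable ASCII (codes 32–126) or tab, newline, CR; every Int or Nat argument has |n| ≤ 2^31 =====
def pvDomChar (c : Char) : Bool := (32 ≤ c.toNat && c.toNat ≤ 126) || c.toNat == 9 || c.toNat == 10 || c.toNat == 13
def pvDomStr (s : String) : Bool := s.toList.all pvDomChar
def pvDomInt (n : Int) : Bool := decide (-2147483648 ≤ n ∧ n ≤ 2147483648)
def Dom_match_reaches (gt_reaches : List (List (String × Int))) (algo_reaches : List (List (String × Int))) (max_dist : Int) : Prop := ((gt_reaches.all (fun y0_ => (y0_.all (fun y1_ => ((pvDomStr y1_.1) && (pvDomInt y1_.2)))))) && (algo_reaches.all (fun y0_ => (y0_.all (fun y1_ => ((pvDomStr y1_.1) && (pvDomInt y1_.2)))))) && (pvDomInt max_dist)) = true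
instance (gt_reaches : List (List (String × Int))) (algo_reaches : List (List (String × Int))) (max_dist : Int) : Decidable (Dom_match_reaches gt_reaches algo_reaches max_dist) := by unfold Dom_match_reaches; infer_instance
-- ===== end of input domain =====

-- B re-implements the sorted-candidate greedy as a repeated-minimum loop (no global
-- candidate list, no sort); equivalence of the two matchings is proved below.

-- ===== PORT A =====
-- gr['start_frame']: Pre_ guarantees the key is present (Python raises KeyError otherwise),
-- so the total form returns the first value bound to "start_frame".
def pvStartA (r : List (String × Int)) : Int := ((PySem.Dict.mk r).get? "start_frame").getD 0
-- ar.get('start_frame', 0)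
def pvGetA (r : List (String × Int)) : Int := PySem.Dict.getD (PySem.Dict.mk r) "start_frame" 0
-- Python sorts the (dist, gi, ai) tuples lexicographically: the sort key is the
-- lexicographic order on Int × Int × Int.
def pvKeyA (t : Int × Int × Int) : Lex (Int × Lex (Int × Int)) := toLex (t.1, toLex (t.2.1, t.2.2))
-- one step of A's greedy loop over the sorted candidates; state = (gt_used, algo_used, matches)
def pvStepA (st : PySem.Set Int × PySem.Set Int × List (Int × Int × Int)) (e : Int × Int × Int) : PySem.Set Int × PySem.Set Int × List (Int × Int × Int) :=
  if !(PySem.Set.contains st.1 e.2.1) && !(PySem.Set.contains st.2.1 e.2.2) then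
    (PySem.Set.add st.1 e.2.1, PySem.Set.add st.2.1 e.2.2, st.2.2 ++ [(e.2.1, e.2.2, e.1)])
  else st

def match_reaches (gt_reaches : List (List (String × Int))) (algo_reaches : List (List (String × Int))) (max_dist : Int) : (List (Int × Int × Int)) × List Int :=
  let candidates : List (Int × Int × Int) :=
    (PySem.List.enumerate gt_reaches).foldl (fun acc p =>
      (PySem.List.enumerate algo_reaches).foldl (fun acc2 q =>
        let dist := |pvStartA p.2 - pvGetA q.2|
        if dist ≤ max_dist then acc2 ++ [(dist, p.1, q.1)] else acc2) acc) []
  let sortedC := PySem.List.sorted candidates pvKeyA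
  let st := sortedC.foldl pvStepA (PySem.Set.empty, PySem.Set.empty, [])
  (st.2.2, PySem.Set.diff (PySem.Set.ofList (PySem.List.pyRange 0 gt_reaches.length)) st.1)

-- ===== PORT B =====
def pvStartB (r : List (String × Int)) : Int := ((PySem.Dict.mk r).get? "start_frame").getD 0
def pvGetB (r : List (String × Int)) : Int := PySem.Dict.getD (PySem.Dict.mk r) "start_frame" 0
def pvKeyB (t : Int × Int × Int) : Lex (Int × Lex (Int × Int)) := toLex (t.1, toLex (t.2.1, t.2.2))

-- the `free` comprehension of Source B: still-free candidate edges, in (gi, ai) order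
def pvFreeB (gt_reaches : List (List (String × Int))) (algo_reaches : List (List (String × Int))) (max_dist : Int) (gtU aU : PySem.Set Int) : List (Int × Int × Int) :=
  (PySem.List.enumerate gt_reaches).flatMap (fun p =>
    if PySem.Set.contains gtU p.1 then [] else
      (PySem.List.enumerate algo_reaches).flatMap (fun q =>
        if PySem.Set.contains aU q.1 then [] else
          let d := |pvStartB p.2 - pvGetB q.2|
          if d ≤ max_dist then [(d, p.1, q.1)] else []))

-- Source B's `while True` loop; the fuel only bounds the iteration count (each pass either
-- breaks or marks a fresh pair used, so the bound below is never reached)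
def pvLoopB (gt_reaches : List (List (String × Int))) (algo_reaches : List (List (String × Int))) (max_dist : Int) : Nat → PySem.Set Int → PySem.Set Int → List (Int × Int × Int) → (List (Int × Int × Int)) × PySem.Set Int
  | 0, gtU, _, ms => (ms, gtU)
  | fuel+1, gtU, aU, ms =>
    match PySem.List.min? (pvFreeB gt_reaches algo_reaches max_dist gtU aU) pvKeyB with
    | none => (ms, gtU)
    | some e => pvLoopB gt_reaches algo_reaches max_dist fuel (PySem.Set.add gtU e.2.1) (PySem.Set.add aU e.2.2) (ms ++ [(e.2.1, e.2.2, e.1)])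

def match_reaches_alt (gt_reaches : List (List (String × Int))) (algo_reaches : List (List (String × Int))) (max_dist : Int) : (List (Int × Int × Int)) × List Int :=
  let r := pvLoopB gt_reaches algo_reaches max_dist (gt_reaches.length * algo_reaches.length + 1) PySem.Set.empty PySem.Set.empty []
  (r.1, PySem.Set.ofList ((PySem.List.pyRange 0 gt_reaches.length).filter (fun i => !(PySem.Set.contains r.2 i))))

-- ===== PRECONDITION & SPEC =====
-- Pre_ excludes inputs where some gt entry lacks the key "start_frame" while
-- algo_reaches is non-empty: there gr['start_frame'] raises KeyError (in A and in
-- B alike; with algo_reaches = [] the access is never reached).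
def Pre_match_reaches (gt_reaches : List (List (String × Int))) (algo_reaches : List (List (String × Int))) (max_dist : Int) : Prop :=
  algo_reaches ≠ [] → ∀ r ∈ gt_reaches, ∃ p ∈ r, p.1 = "start_frame"
instance (gt_reaches : List (List (String × Int))) (algo_reaches : List (List (String × Int))) (max_dist : Int) : Decidable (Pre_match_reaches gt_reaches algo_reaches max_dist) := by unfold Pre_match_reaches; infer_instance
def pvWitness_match_reaches : (List (List (String × Int))) × (List (List (String × Int))) × Int :=
  ([[("start_frame", 3)], [("start_frame", 40)]], [[("start_frame", 1)], []], 30)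

def Spec_match_reaches (gt_reaches : List (List (String × Int))) (algo_reaches : List (List (String × Int))) (max_dist : Int) (out : (List (Int × Int × Int)) × List Int) : Prop := out = match_reaches_alt gt_reaches algo_reaches max_dist
instance (gt_reaches : List (List (String × Int))) (algo_reaches : List (List (String × Int))) (max_dist : Int) (out : (List (Int × Int × Int)) × List Int) : Decidable (Spec_match_reaches gt_reaches algo_reaches max_dist out) := by unfold Spec_match_reaches; infer_instance

-- ===== CLAIM (what is proved, stated in full; the proofs are below) =====
def Claim_equal_match_reaches : Prop := ∀ (gt_reaches : List (List (String × Int))) (algo_reaches : List (List (String × Int))) (max_dist : Int), Dom_match_reaches gt_reaches algo_reaches max_dist → Pre_match_reaches gt_reaches algo_reaches max_dist → Spec_match_reaches gt_reaches algo_reaches max_dist (match_reaches gt_reaches algo_reaches max_dist)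

-- ===== LEMMAS AND PROOFS =====

theorem pvKeyB_inj : Function.Injective pvKeyB := by
  intro x y h
  simp only [pvKeyB, toLex] at h
  obtain ⟨x1, x2, x3⟩ := x
  obtain ⟨y1, y2, y3⟩ := y
  simp_all

theorem pvKeyA_eq_pvKeyB : pvKeyA = pvKeyB := rfl

theorem pv_mem_freeB (gt algo : List (List (String × Int))) (maxd : Int) (g a : PySem.Set Int) (e : Int × Int × Int) :
    e ∈ pvFreeB gt algo maxd g a ↔
      e ∈ pvFreeB gt algo maxd PySem.Set.empty PySem.Set.empty ∧ e.2.1 ∉ g ∧ e.2.2 ∉ a := by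
  simp only [pvFreeB, List.mem_flatMap, List.mem_ite_nil_left, PySem.Set.contains_iff]
  constructor
  · rintro ⟨p, hp, hpg, q, hq, hqa, he⟩
    split at he
    · simp only [List.mem_singleton] at he
      subst he
      refine ⟨⟨p, hp, ?_, q, hq, ?_, ?_⟩, hpg, hqa⟩
      · simp [PySem.Set.empty]
      · simp [PySem.Set.empty]
      · simp [*]
    · simp at he
  · rintro ⟨⟨p, hp, -, q, hq, -, he⟩, hg, ha⟩
    split at he
    · simp only [List.mem_singleton] at he
      subst he
      exact ⟨p, hp, hg, q, hq, ha, by simp [*]⟩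
    · simp at he

theorem pv_foldl_flat {α β : Type} (f : α → List β) (step : List β → α → List β)
    (hstep : ∀ acc x, step acc x = acc ++ f x) : ∀ (l : List α) (acc : List β),
    l.foldl step acc = acc ++ l.flatMap f := by
  intro l
  induction l with
  | nil => simp
  | cons x t ih => intro acc; simp [hstep, ih]

theorem pv_candA_eq (gt algo : List (List (String × Int))) (maxd : Int) :
    (PySem.List.enumerate gt).foldl (fun acc p =>
      (PySem.List.enumerate algo).foldl (fun acc2 q =>
        let dist := |pvStartA p.2 - pvGetA q.2|
        if dist ≤ maxd then acc2 ++ [(dist, p.1, q.1)] else acc2) acc) [] =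
    pvFreeB gt algo maxd PySem.Set.empty PySem.Set.empty := by
  have h1 : ∀ (p : Int × List (String × Int)) (acc : List (Int × Int × Int)),
      (PySem.List.enumerate algo).foldl (fun acc2 q =>
        let dist := |pvStartA p.2 - pvGetA q.2|
        if dist ≤ maxd then acc2 ++ [(dist, p.1, q.1)] else acc2) acc =
      acc ++ (PySem.List.enumerate algo).flatMap (fun q =>
        let d := |pvStartB p.2 - pvGetB q.2|
        if d ≤ maxd then [(d, p.1, q.1)] else []) := by
    intro p acc
    apply pv_foldl_flat
    intro acc2 q
    by_cases h : |pvStartA p.2 - pvGetA q.2| ≤ maxd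
    · simp only [pvStartA, pvGetA] at h ⊢
      simp [h, pvStartB, pvGetB]
    · simp only [pvStartA, pvGetA] at h ⊢
      simp [h, pvStartB, pvGetB]
  rw [pv_foldl_flat _ _ (fun acc p => h1 p acc)]
  simp only [List.nil_append]
  simp [pvFreeB, PySem.Set.empty, PySem.Set.contains]

theorem pv_flatMap_len_le {α β : Type} (f : α → List β) (l : List α) (k : Nat)
    (h : ∀ x ∈ l, (f x).length ≤ k) : (l.flatMap f).length ≤ k * l.length := by
  induction l with
  | nil => simp
  | cons x t ih =>
    simp only [List.flatMap_cons, List.length_append, List.length_cons]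
    have := h x (by simp)
    have := ih (fun y hy => h y (by simp [hy]))
    rw [Nat.mul_succ]
    omega

theorem pv_cand_len (gt algo : List (List (String × Int))) (maxd : Int) :
    (pvFreeB gt algo maxd PySem.Set.empty PySem.Set.empty).length ≤ gt.length * algo.length := by
  unfold pvFreeB
  have h := pv_flatMap_len_le (l := PySem.List.enumerate gt) (k := algo.length)
    (f := fun p => if PySem.Set.contains PySem.Set.empty p.1 then [] else
      (PySem.List.enumerate algo).flatMap (fun q =>
        if PySem.Set.contains PySem.Set.empty q.1 then [] else
          let d := |pvStartB p.2 - pvGetB q.2|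
          if d ≤ maxd then [(d, p.1, q.1)] else []))
  rw [PySem.List.length_enumerate] at h
  apply le_trans (h ?_) (le_of_eq (Nat.mul_comm _ _))
  intro p _
  split
  · simp
  · have h2 := pv_flatMap_len_le (l := PySem.List.enumerate algo) (k := 1)
      (f := fun q => if PySem.Set.contains PySem.Set.empty q.1 then [] else
          let d := |pvStartB p.2 - pvGetB q.2|
          if d ≤ maxd then [(d, p.1, q.1)] else [])
    rw [PySem.List.length_enumerate, Nat.one_mul] at h2
    apply h2
    intro q _
    split
    · simp
    · dsimp only
      split <;> simp

theorem pv_main (gt algo : List (List (String × Int))) (maxd : Int)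
    (L : List (Int × Int × Int)) :
    ∀ (fuel : Nat) (g a : PySem.Set Int) (ms : List (Int × Int × Int)),
    L.Pairwise (fun x y => pvKeyB x ≤ pvKeyB y) →
    (∀ e ∈ L, e ∈ pvFreeB gt algo maxd PySem.Set.empty PySem.Set.empty) →
    (∀ e ∈ pvFreeB gt algo maxd PySem.Set.empty PySem.Set.empty, e.2.1 ∉ g → e.2.2 ∉ a → e ∈ L) →
    L.length < fuel →
    pvLoopB gt algo maxd fuel g a ms = ((L.foldl pvStepA (g, a, ms)).2.2, (L.foldl pvStepA (g, a, ms)).1) := by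
  induction L with
  | nil =>
    intro fuel g a ms _ _ h3 h4
    obtain ⟨f, rfl⟩ : ∃ f, fuel = f + 1 := ⟨fuel - 1, by omega⟩
    have hfree : pvFreeB gt algo maxd g a = [] := by
      rw [List.eq_nil_iff_forall_not_mem]
      intro e he
      rw [pv_mem_freeB] at he
      exact absurd (h3 e he.1 he.2.1 he.2.2) (List.not_mem_nil)
    simp [pvLoopB, hfree, PySem.List.min?]
  | cons e rest ih =>
    intro fuel g a ms h1 h2 h3 h4
    obtain ⟨f, rfl⟩ : ∃ f, fuel = f + 1 := ⟨fuel - 1, by omega⟩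
    by_cases hgfree : e.2.1 ∉ g ∧ e.2.2 ∉ a
    · -- the head of the sorted remaining list is free: B picks exactly it
      have heC : e ∈ pvFreeB gt algo maxd PySem.Set.empty PySem.Set.empty := h2 e (by simp)
      have heF : e ∈ pvFreeB gt algo maxd g a :=
        (pv_mem_freeB gt algo maxd g a e).mpr ⟨heC, hgfree.1, hgfree.2⟩
      have hmin : PySem.List.min? (pvFreeB gt algo maxd g a) pvKeyB = some e := by
        cases hm : PySem.List.min? (pvFreeB gt algo maxd g a) pvKeyB with
        | none =>
          rw [PySem.List.min?_eq_none_iff] at hm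
          rw [hm] at heF
          exact absurd heF (List.not_mem_nil)
        | some m =>
          have hmem := PySem.List.min?_mem hm
          rw [pv_mem_freeB] at hmem
          have hmL : m ∈ e :: rest := h3 m hmem.1 hmem.2.1 hmem.2.2
          have h5 : pvKeyB m ≤ pvKeyB e := PySem.List.min?_isMin hm e heF
          have h6 : pvKeyB e ≤ pvKeyB m := by
            rcases List.mem_cons.mp hmL with h | h
            · rw [h]
            · exact (List.pairwise_cons.mp h1).1 m h
          rw [pvKeyB_inj (le_antisymm h5 h6)]
      have hstep : pvStepA (g, a, ms) e =
          (PySem.Set.add g e.2.1, PySem.Set.add a e.2.2, ms ++ [(e.2.1, e.2.2, e.1)]) := by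
        simp [pvStepA]
        exact hgfree
      rw [List.foldl_cons, hstep]
      rw [show pvLoopB gt algo maxd (f + 1) g a ms =
            pvLoopB gt algo maxd f (PySem.Set.add g e.2.1) (PySem.Set.add a e.2.2)
              (ms ++ [(e.2.1, e.2.2, e.1)]) by rw [pvLoopB, hmin]]
      apply ih f _ _ _ (List.Pairwise.of_cons h1)
        (fun x hx => h2 x (List.mem_cons_of_mem e hx))
        ?_ (by simp only [List.length_cons] at h4; omega)
      intro x hC hx1 hx2
      have hx1' : x.2.1 ∉ g := fun h => hx1 ((PySem.Set.mem_add g e.2.1 x.2.1).mpr (Or.inl h))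
      have hx2' : x.2.2 ∉ a := fun h => hx2 ((PySem.Set.mem_add a e.2.2 x.2.2).mpr (Or.inl h))
      rcases List.mem_cons.mp (h3 x hC hx1' hx2') with h | h
      · exact absurd ((PySem.Set.mem_add g e.2.1 x.2.1).mpr (Or.inr (by rw [h]))) hx1
      · exact h
    · -- head not free: A skips it, B's scan never offers it
      have hstep : pvStepA (g, a, ms) e = (g, a, ms) := by
        rcases Decidable.not_and_iff_not_or_not.mp hgfree with h | h
        · simp [pvStepA]
          intro hg
          exact absurd hg h
        · simp [pvStepA]
          intro _
          exact Decidable.not_not.mp h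
      rw [List.foldl_cons, hstep]
      apply ih (f + 1) g a ms (List.Pairwise.of_cons h1)
        (fun x hx => h2 x (List.mem_cons_of_mem e hx))
        ?_ (by simp only [List.length_cons] at h4; omega)
      intro x hC hx1 hx2
      rcases List.mem_cons.mp (h3 x hC hx1 hx2) with h | h
      · exact absurd (h ▸ And.intro hx1 hx2) hgfree
      · exact h

theorem pv_snd_eq (n : Int) (g : PySem.Set Int) :
    PySem.Set.diff (PySem.Set.ofList (PySem.List.pyRange 0 n)) g =
    PySem.Set.ofList ((PySem.List.pyRange 0 n).filter (fun i => !(PySem.Set.contains g i))) := by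
  rw [PySem.Set.ofList_eq_self_of_nodup _ (PySem.List.nodup_pyRange_one 0 n),
      PySem.Set.ofList_eq_self_of_nodup _ ((PySem.List.nodup_pyRange_one 0 n).filter _)]
  rfl

-- ===== VERDICT (by name: the statement is the Claim_ definition above) =====
theorem match_reaches_spec : Claim_equal_match_reaches := by
  unfold Claim_equal_match_reaches
  intro gt algo maxd _ _
  unfold Spec_match_reaches match_reaches match_reaches_alt
  simp only []
  rw [pv_candA_eq gt algo maxd]
  have hmain := pv_main gt algo maxd
    (PySem.List.sorted (pvFreeB gt algo maxd PySem.Set.empty PySem.Set.empty) pvKeyA)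
    (gt.length * algo.length + 1) PySem.Set.empty PySem.Set.empty []
    (by rw [pvKeyA_eq_pvKeyB]; exact PySem.List.sorted_pairwise _ pvKeyB)
    (fun e he => (PySem.List.mem_sorted _ _ _ e).mp he)
    (fun e heC _ _ => (PySem.List.mem_sorted _ _ _ e).mpr heC)
    (by
      rw [PySem.List.length_sorted]
      exact Nat.lt_succ_of_le (pv_cand_len gt algo maxd))
  rw [hmain, pv_snd_eq]
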